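-- pv_equiv track=rewrite | github.com/IanVermes/nested_bracket_problem | create_nested_strings.py | sort_by_group
-- ===== SOURCE A (Python) =====
-- import typing as t
--
-- __SORTING_INDEX_BY_GROUP: t.Dict[str, int] = {
--     char: i for i, char in enumerate("{}[]()")
-- }
--
-- def sort_by_group(string: str) -> str:
--     """Sort all brackets in a string by their group."""
--     indexed_string: t.List[t.Tuple[int, str]] = []
--     for char in string:
--         index = __SORTING_INDEX_BY_GROUP.get(char, -1)
--         indexed_char: t.Tuple[int, str] = (index, char)
--         indexed_string.append(indexed_char)
--     indexed_string.sort()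
--     sorted_string = "".join([char for _, char in indexed_string])
--     return sorted_string
-- ===== SOURCE B (Python) =====
-- def sort_by_group(string: str) -> str:
--     """Sort all brackets in a string by their group."""
--     counts = {char: 0 for char in "{}[]()"}
--     rest = []
--     for char in string:
--         if char in counts:
--             counts[char] += 1
--         else:
--             rest.append(char)
--     rest.sort()
--     return "".join(rest) + "".join(char * counts[char] for char in "{}[]()")
-- ===== Notes on version B (the rewrite author's own statement) =====
-- stated objective: faster
-- what changed: Replaces A's comparison sort over (group-index, char) pairs by a single counting pass that tallies the six bracket characters in a fixed dict and collects the rest, then sorts only the non-bracket remainder and appends each bracket repeated by its count in the dict's fixed group order.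
import Mathlib
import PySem

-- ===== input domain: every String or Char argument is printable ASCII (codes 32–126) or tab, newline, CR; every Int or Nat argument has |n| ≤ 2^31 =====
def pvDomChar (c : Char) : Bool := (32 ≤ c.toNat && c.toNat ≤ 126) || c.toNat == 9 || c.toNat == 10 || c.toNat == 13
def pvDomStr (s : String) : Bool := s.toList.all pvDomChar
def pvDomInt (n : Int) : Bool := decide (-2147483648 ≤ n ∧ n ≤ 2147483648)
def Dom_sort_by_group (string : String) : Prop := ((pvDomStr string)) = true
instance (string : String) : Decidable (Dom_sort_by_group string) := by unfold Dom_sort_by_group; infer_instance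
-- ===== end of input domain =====

-- B replaces A's comparison sort of (group-index, char) pairs by one counting pass over the six
-- bracket characters plus a sort of only the non-bracket remainder (objective: faster, measured).

-- ===== PORT A =====
-- __SORTING_INDEX_BY_GROUP = {char: i for i, char in enumerate("{}[]()")}
def pvSortingIndex : PySem.Dict Char Int :=
  (PySem.List.enumerate "{}[]()".toList 0).foldl
    (fun d p => d.insert p.2 p.1) PySem.Dict.empty

def sort_by_group (string : String) : String :=
  let indexed_string : List (Int × Char) :=
    string.toList.foldl (fun acc char => acc ++ [(pvSortingIndex.getD char (-1), char)]) []
  let sorted_pairs := PySem.List.sorted2 indexed_string (fun p => p.1) (fun p => p.2) false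
  String.ofList (sorted_pairs.map (fun p => p.2))

-- ===== PORT B =====
-- counts = {char: 0 for char in "{}[]()"}
def pvCounts0 : PySem.Dict Char Int :=
  "{}[]()".toList.foldl (fun d c => d.insert c 0) PySem.Dict.empty

def sort_by_group_alt (string : String) : String :=
  let st := string.toList.foldl
    (fun (st : PySem.Dict Char Int × List Char) char =>
      if st.1.contains char then (st.1.modify char 0 (· + 1), st.2)
      else (st.1, st.2 ++ [char]))
    (pvCounts0, [])
  let rest := PySem.List.sorted st.2 (fun x => x) false
  String.ofList (rest ++ "{}[]()".toList.flatMap (fun char => PySem.List.pyRepeat [char] (st.1.getD char 0)))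

-- ===== PRECONDITION & SPEC =====
def Spec_sort_by_group (string : String) (out : String) : Prop := out = sort_by_group_alt string
instance (string : String) (out : String) : Decidable (Spec_sort_by_group string out) := by unfold Spec_sort_by_group; infer_instance

-- ===== CLAIM (what is proved, stated in full; the proofs are below) =====
def Claim_equal_sort_by_group : Prop := ∀ (string : String), Dom_sort_by_group string → Spec_sort_by_group string (sort_by_group string)

-- ===== LEMMAS AND PROOFS =====

def pvBrackets : List Char := ['{', '}', '[', ']', '(', ')']

theorem pvBr_toList : "{}[]()".toList = pvBrackets := by decide

-- the group index as an explicit function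
def pvIdx (c : Char) : Int :=
  if c = '{' then 0 else if c = '}' then 1 else if c = '[' then 2
  else if c = ']' then 3 else if c = '(' then 4 else if c = ')' then 5 else -1

-- an Int key realising Python's lexicographic order on A's (index, char) pairs
def pvEnc (p : Int × Char) : Int := p.1 * 4294967296 + (p.2.toNat : Int)

def pvKey (c : Char) : Int := pvEnc (pvIdx c, c)

theorem pvGetD_sortingIndex (c : Char) : pvSortingIndex.getD c (-1) = pvIdx c := by
  unfold pvSortingIndex pvIdx
  simp [PySem.Dict.getD, PySem.Dict.get?, PySem.List.enumerate, PySem.Dict.insert, PySem.Dict.empty]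
  split_ifs with h1 h2 h3 h4 h5 h6 <;> try simp_all
  simp [beq_eq_false_iff_ne.mpr (Ne.symm h1), beq_eq_false_iff_ne.mpr (Ne.symm h2),
    beq_eq_false_iff_ne.mpr (Ne.symm h3), beq_eq_false_iff_ne.mpr (Ne.symm h4),
    beq_eq_false_iff_ne.mpr (Ne.symm h5), beq_eq_false_iff_ne.mpr (Ne.symm h6)]

theorem pvContains_counts0 (c : Char) :
    pvCounts0.contains c = decide (c ∈ pvBrackets) := by
  by_cases h : c ∈ pvBrackets
  · rw [(PySem.Dict.contains_iff_mem_keys pvCounts0 c).mpr, decide_eq_true h]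
    rw [show pvCounts0.keys = pvBrackets from by decide]; exact h
  · rw [decide_eq_false h]
    cases hb : pvCounts0.contains c with
    | false => rfl
    | true =>
      exfalso; apply h
      have := (PySem.Dict.contains_iff_mem_keys pvCounts0 c).mp hb
      rwa [show pvCounts0.keys = pvBrackets from by decide] at this

theorem pvToNat_lt (c : Char) : (c.toNat : Int) < 4294967296 := by
  have h1 := UInt32.toNat_lt_size c.val
  have h2 : c.toNat = c.val.toNat := rfl
  simp [UInt32.size] at h1
  omega

theorem pvToNat_nonneg (c : Char) : (0 : Int) ≤ (c.toNat : Int) := by positivity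

theorem pvChar_lt_iff (a b : Char) : a < b ↔ (a.toNat : Int) < (b.toNat : Int) := by
  simp [Char.lt_def, UInt32.lt_iff_toNat_lt]

theorem pvChar_le_iff (a b : Char) : a ≤ b ↔ (a.toNat : Int) ≤ (b.toNat : Int) := by
  simp [Char.le_def, UInt32.le_iff_toNat_le]

theorem pvChar_toNat_inj (a b : Char) (h : (a.toNat : Int) = (b.toNat : Int)) : a = b := by
  have : a.toNat = b.toNat := by omega
  exact Char.ext (UInt32.toNat_inj.mp this)

theorem pvKey_inj : Function.Injective pvKey := by
  intro a b h
  have h' : pvIdx a * 4294967296 + (a.toNat : Int) = pvIdx b * 4294967296 + (b.toNat : Int) := h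
  have ha := pvToNat_lt a; have hb := pvToNat_lt b
  have ha0 := pvToNat_nonneg a; have hb0 := pvToNat_nonneg b
  exact pvChar_toNat_inj a b (by omega)

-- Python's lexicographic before-function on (index,char) pairs is comparison of pvEnc
theorem pvLex_eq_enc (a b : Int × Char) :
    (decide (a.1 < b.1) || !decide (b.1 < a.1) && decide (a.2 < b.2))
      = decide (pvEnc a < pvEnc b) := by
  rcases a with ⟨i, x⟩; rcases b with ⟨j, y⟩
  have h1 := pvToNat_lt x; have h2 := pvToNat_lt y
  have h3 := pvToNat_nonneg x; have h4 := pvToNat_nonneg y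
  simp only [pvEnc, pvChar_lt_iff]
  rw [show (decide (i < j) || !decide (j < i) && decide ((x.toNat : Int) < (y.toNat : Int)))
        = decide (i < j ∨ (¬ j < i ∧ (x.toNat : Int) < (y.toNat : Int))) from by
      by_cases hij : i < j <;> by_cases hji : j < i <;>
        by_cases hxy : (x.toNat : Int) < (y.toNat : Int) <;> simp [hij, hji, hxy]]
  exact decide_eq_decide.mpr (by omega)

theorem pvSorted2_eq_sorted (xs : List (Int × Char)) :
    PySem.List.sorted2 xs (fun p => p.1) (fun p => p.2) false
      = PySem.List.sorted xs pvEnc false := by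
  show xs.foldl (fun acc x => PySem.List.insertBy _ x acc) []
      = xs.foldl (fun acc x => PySem.List.insertBy _ x acc) []
  rw [show (fun (a b : Int × Char) =>
          decide (a.1 < b.1) || !decide (b.1 < a.1) && decide (a.2 < b.2))
        = fun a b => decide (pvEnc a < pvEnc b) from
      funext fun a => funext fun b => pvLex_eq_enc a b]

theorem pvInsertBy_map {α β : Type} (f : α → β) (bf : β → β → Bool) (x : α) (l : List α) :
    PySem.List.insertBy bf (f x) (l.map f)
      = (PySem.List.insertBy (fun a b => bf (f a) (f b)) x l).map f := by
  induction l with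
  | nil => simp [PySem.List.insertBy]
  | cons y ys ih =>
    simp only [List.map_cons, PySem.List.insertBy]
    split_ifs <;> simp_all

theorem pvFoldl_insertBy_map {α β : Type} (f : α → β) (bf : β → β → Bool)
    (l : List α) (acc : List α) :
    (l.foldl (fun acc x => PySem.List.insertBy (fun a b => bf (f a) (f b)) x acc) acc).map f
      = l.foldl (fun acc x => PySem.List.insertBy bf (f x) acc) (acc.map f) := by
  induction l generalizing acc with
  | nil => rfl
  | cons y ys ih => simp only [List.foldl_cons, ih, pvInsertBy_map]

theorem pvSorted_map {α β κ : Type} [LT κ] [DecidableLT κ] (f : α → β) (key : β → κ) (l : List α) :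
    PySem.List.sorted (l.map f) key false
      = (PySem.List.sorted l (fun x => key (f x)) false).map f := by
  show (l.map f).foldl
        (fun acc x => PySem.List.insertBy (fun a b => decide (key a < key b)) x acc) []
      = (l.foldl (fun acc x =>
          PySem.List.insertBy (fun a b => decide (key (f a) < key (f b))) x acc) []).map f
  rw [List.foldl_map]
  exact (pvFoldl_insertBy_map f (fun a b => decide (key a < key b)) l []).symm

-- A's output characterised: the chars of `string` sorted (stably) by pvKey
theorem pvA_chars (l : List Char) :
    (PySem.List.sorted2
        (l.foldl (fun acc char => acc ++ [(pvSortingIndex.getD char (-1), char)]) [])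
        (fun p => p.1) (fun p => p.2) false).map (fun p => p.2)
      = PySem.List.sorted l pvKey false := by
  rw [PySem.List.foldl_append_singleton_eq_map, List.nil_append]
  have hmap : l.map (fun char => (pvSortingIndex.getD char (-1), char))
      = l.map (fun char => (pvIdx char, char)) :=
    List.map_congr_left fun c _ => by rw [pvGetD_sortingIndex]
  rw [pvSorted2_eq_sorted, hmap, pvSorted_map (fun c => (pvIdx c, c)) pvEnc l, List.map_map]
  rw [show ((fun p : Int × Char => p.2) ∘ fun c => (pvIdx c, c)) = id from rfl, List.map_id]
  rfl

-- ---- B's loop ----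
def pvStep (st : PySem.Dict Char Int × List Char) (char : Char) : PySem.Dict Char Int × List Char :=
  if st.1.contains char then (st.1.modify char 0 (· + 1), st.2)
  else (st.1, st.2 ++ [char])

theorem pvLoop_snd (l : List Char) (d : PySem.Dict Char Int) (r : List Char) :
    (l.foldl pvStep (d, r)).2 = r ++ l.filter (fun c => !(d.contains c)) := by
  induction l generalizing d r with
  | nil => simp
  | cons x xs ih =>
    simp only [List.foldl_cons, pvStep]
    split_ifs with hx
    · rw [ih]
      have hf : xs.filter (fun c => !((d.modify x 0 (· + 1)).contains c))
          = xs.filter (fun c => !(d.contains c)) := by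
        apply List.filter_congr; intro c _
        rw [PySem.Dict.contains_modify]
        rcases eq_or_ne c x with rfl | hne
        · simp [hx]
        · simp [hne]
      rw [hf, List.filter_cons_of_neg (by simp [hx])]
    · rw [ih, List.filter_cons_of_pos (by simp [hx])]
      simp

theorem pvLoop_getD (l : List Char) (d : PySem.Dict Char Int) (r : List Char) (c : Char)
    (hc : d.contains c = true) :
    ((l.foldl pvStep (d, r)).1).getD c 0 = d.getD c 0 + (l.count c : Int) := by
  induction l generalizing d r with
  | nil => simp
  | cons x xs ih =>
    simp only [List.foldl_cons, pvStep]
    split_ifs with hx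
    · rw [ih _ r (by rw [PySem.Dict.contains_modify]; simp [hc])]
      rw [PySem.Dict.getD_modify]
      rcases eq_or_ne c x with rfl | hne
      · simp; ring
      · simp [hne, Ne.symm hne]
    · rw [ih d (r ++ [x]) hc]
      have hne : x ≠ c := fun h => hx (h ▸ hc)
      simp [hne]

-- the bracket blocks are (as a multiset) exactly the bracket characters of l
theorem pvGroups_perm (l : List Char) :
    (List.replicate (l.count '{') '{' ++ (List.replicate (l.count '}') '}' ++
      (List.replicate (l.count '[') '[' ++ (List.replicate (l.count ']') ']' ++
      (List.replicate (l.count '(') '(' ++ List.replicate (l.count ')') ')'))))).Perm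
      (l.filter (fun c => decide (c ∈ pvBrackets))) := by
  rw [List.perm_iff_count]
  intro a
  by_cases h : a ∈ pvBrackets
  · fin_cases h <;>
      (rw [List.count_filter (p := fun c => decide (c ∈ pvBrackets)) (by decide)]
       simp [List.count_append, List.count_replicate])
  · have h0 : a ∉ l.filter (fun c => decide (c ∈ pvBrackets)) := by
      simp [List.mem_filter, h]
    rw [List.count_eq_zero.mpr h0]
    simp only [pvBrackets, List.mem_cons, List.not_mem_nil, or_false, not_or] at h
    obtain ⟨h1, h2, h3, h4, h5, h6⟩ := h
    simp [List.count_append, List.count_replicate,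
      Ne.symm h1, Ne.symm h2, Ne.symm h3, Ne.symm h4, Ne.symm h5, Ne.symm h6]

theorem pvIdx_nonbracket (c : Char) (h : c ∉ pvBrackets) : pvIdx c = -1 := by
  simp only [pvBrackets, List.mem_cons, List.not_mem_nil, or_false, not_or] at h
  obtain ⟨h1, h2, h3, h4, h5, h6⟩ := h
  simp [pvIdx, h1, h2, h3, h4, h5, h6]

theorem pvKey_nonbracket (c : Char) (h : c ∉ pvBrackets) :
    pvKey c = -4294967296 + (c.toNat : Int) := by
  unfold pvKey pvEnc
  rw [pvIdx_nonbracket c h]; ring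

-- a concatenation of constant blocks in pvKey order is pvKey-sorted
theorem pvPairwise_flat (cs : List Char) (ns : Char → Nat)
    (h : cs.Pairwise (fun a b => pvKey a ≤ pvKey b)) :
    List.Pairwise (fun a b => pvKey a ≤ pvKey b)
      (cs.flatMap (fun c => List.replicate (ns c) c)) := by
  induction cs with
  | nil => simp
  | cons c cs ih =>
    rcases List.pairwise_cons.mp h with ⟨hc, ht⟩
    simp only [List.flatMap_cons, List.pairwise_append]
    refine ⟨List.pairwise_replicate.mpr (Or.inr le_rfl), ih ht, ?_⟩
    intro a ha b hb
    rw [List.eq_of_mem_replicate ha]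
    obtain ⟨c', hc', hb'⟩ := List.mem_flatMap.mp hb
    rw [List.eq_of_mem_replicate hb']
    exact hc c' hc'

-- the heart: sorting by pvKey = sorted non-brackets, then the six bracket blocks
theorem pvMain (l : List Char) :
    PySem.List.sorted l pvKey false
      = PySem.List.sorted (l.filter (fun c => !(decide (c ∈ pvBrackets)))) (fun x => x) false
        ++ (List.replicate (l.count '{') '{' ++ (List.replicate (l.count '}') '}' ++
          (List.replicate (l.count '[') '[' ++ (List.replicate (l.count ']') ']' ++
          (List.replicate (l.count '(') '(' ++ List.replicate (l.count ')') ')'))))) := by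
  apply PySem.List.eq_of_perm_of_pairwise_le_of_injective pvKey pvKey_inj
  · -- both sides are permutations of l
    refine (PySem.List.sorted_perm l pvKey false).trans (List.Perm.symm ?_)
    refine (List.Perm.append (PySem.List.sorted_perm _ _ false) (pvGroups_perm l)).trans ?_
    exact (List.perm_append_comm).trans
      (List.filter_append_perm (fun c => decide (c ∈ pvBrackets)) l)
  · exact PySem.List.sorted_pairwise l pvKey
  · -- the right-hand side is ordered by pvKey
    have hrest : ∀ a ∈ PySem.List.sorted (l.filter (fun c => !(decide (c ∈ pvBrackets))))
        (fun x => x) false, a ∉ pvBrackets := by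
      intro a ha
      rw [PySem.List.mem_sorted] at ha
      have := (List.mem_filter.mp ha).2
      simpa using this
    rw [List.pairwise_append]
    refine ⟨?_, ?_, ?_⟩
    · -- sorted non-brackets: char order agrees with pvKey there
      refine List.Pairwise.imp_of_mem ?_
        (PySem.List.sorted_pairwise (l.filter (fun c => !(decide (c ∈ pvBrackets)))) (fun x => x))
      intro a b ha hb hab
      rw [pvKey_nonbracket a (hrest a ha), pvKey_nonbracket b (hrest b hb)]
      have := (pvChar_le_iff a b).mp hab
      omega
    · -- the six constant bracket blocks, in group order
      rw [show List.replicate (l.count '{') '{' ++ (List.replicate (l.count '}') '}' ++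
          (List.replicate (l.count '[') '[' ++ (List.replicate (l.count ']') ']' ++
          (List.replicate (l.count '(') '(' ++ List.replicate (l.count ')') ')')))) =
          pvBrackets.flatMap (fun c => List.replicate (l.count c) c) from by
        simp [pvBrackets]]
      exact pvPairwise_flat pvBrackets (fun c => l.count c) (by decide)
    · -- non-brackets come before every bracket
      intro a ha b hb
      have hk := pvKey_nonbracket a (hrest a ha)
      have hlt := pvToNat_lt a
      have hb' : b ∈ pvBrackets := by
        simp only [List.mem_append] at hb
        rcases hb with hb | hb | hb | hb | hb | hb <;>
          rw [List.eq_of_mem_replicate hb] <;> decide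
      have hpos : (0 : Int) ≤ pvKey b := by fin_cases hb' <;> decide
      rw [hk]; omega

-- ===== VERDICT (by name: the statement is the Claim_ definition above) =====
theorem sort_by_group_spec : Claim_equal_sort_by_group := by
  intro s _
  show String.ofList _ = String.ofList _
  apply congrArg
  rw [pvA_chars s.toList, pvBr_toList]
  rw [show (fun (st : PySem.Dict Char Int × List Char) char =>
        if st.1.contains char then (st.1.modify char 0 (· + 1), st.2)
        else (st.1, st.2 ++ [char])) = pvStep from rfl]
  rw [pvLoop_snd s.toList pvCounts0 []]
  have hgd : ∀ c ∈ pvBrackets,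
      ((s.toList.foldl pvStep (pvCounts0, [])).1).getD c 0 = (s.toList.count c : Int) := by
    intro c hc
    rw [pvLoop_getD s.toList pvCounts0 [] c]
    · rw [show pvCounts0.getD c 0 = 0 from by fin_cases hc <;> decide, zero_add]
    · rw [pvContains_counts0]; exact decide_eq_true hc
  simp only [pvBrackets, List.flatMap_cons, List.flatMap_nil, List.append_nil]
  rw [hgd '{' (by decide), hgd '}' (by decide), hgd '[' (by decide),
      hgd ']' (by decide), hgd '(' (by decide), hgd ')' (by decide)]
  simp only [PySem.List.pyRepeat_singleton, Int.toNat_natCast]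
  have hfil : s.toList.filter (fun c => !(pvCounts0.contains c))
      = s.toList.filter (fun c => !(decide (c ∈ pvBrackets))) := by
    apply List.filter_congr; intro c _; rw [pvContains_counts0]
  rw [List.nil_append, hfil]
  exact pvMain s.toList
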